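-- pv_equiv track=rewrite | github.com/techczech/ox-cabinet-rescue | scripts/scrape_cabinet.py | _choose_from_srcset
-- ===== SOURCE A (Python) =====
-- from typing import Any, Dict, List, Optional
--
-- def _choose_from_srcset(srcset: str) -> Optional[str]:
--     candidates = []
--     for part in srcset.split(","):
--         bits = part.strip().split()
--         if not bits:
--             continue
--         url = bits[0]
--         size = bits[1] if len(bits) > 1 else "0w"
--         width = 0
--         if size.endswith("w"):
--             try:
--                 width = int(size[:-1])
--             except ValueError:
--                 width = 0
--         candidates.append((width, url))
--     if not candidates:
--         return None
--     candidates.sort(key=lambda x: x[0], reverse=True)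
--     return candidates[0][1]
-- ===== SOURCE B (Python) =====
-- from typing import Optional
--
-- def _choose_from_srcset(srcset: str) -> Optional[str]:
--     best = None  # (width, url) with the largest width seen so far (first wins ties)
--     for part in srcset.split(","):
--         bits = part.strip().split()
--         if not bits:
--             continue
--         url = bits[0]
--         size = bits[1] if len(bits) > 1 else "0w"
--         width = 0
--         if size.endswith("w"):
--             try:
--                 width = int(size[:-1])
--             except ValueError:
--                 width = 0
--         if best is None or width > best[0]:
--             best = (width, url)
--     return None if best is None else best[1]
-- ===== Notes on version B (the rewrite author's own statement) =====
-- stated objective: simpler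
-- what changed: B keeps the per-part width/url parsing but replaces collecting all candidates and stable reverse-sorting with a single running best tracked during the loop (strict '>' preserves the first URL among equal widths).
import Mathlib
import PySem

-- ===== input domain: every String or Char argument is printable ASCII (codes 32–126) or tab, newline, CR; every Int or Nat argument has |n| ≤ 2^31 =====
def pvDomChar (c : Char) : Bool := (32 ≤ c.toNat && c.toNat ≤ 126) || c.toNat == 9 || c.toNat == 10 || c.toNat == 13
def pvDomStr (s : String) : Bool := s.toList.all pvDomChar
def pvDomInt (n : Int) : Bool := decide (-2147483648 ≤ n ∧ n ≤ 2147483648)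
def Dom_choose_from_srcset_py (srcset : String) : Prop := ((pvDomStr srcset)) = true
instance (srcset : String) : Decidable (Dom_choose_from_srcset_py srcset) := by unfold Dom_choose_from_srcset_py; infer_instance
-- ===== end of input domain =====

-- B replaces A's collect-all-candidates-then-stable-reverse-sort with a single running best
-- (strict '>' keeps the first URL among equal widths); objective: simpler.

-- ===== PORT A =====
-- parsing of one comma-part into (width, url); this code is identical in A and B,
-- so both ports share it (url = bits[0]; size = bits[1] or "0w"; width = int(size[:-1]) if
-- size ends in "w" and parses, else 0); none = the 'continue' on empty bits
def pvParsePart (part : String) : Option (Int × String) :=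
  match PySem.Str.split₀ (PySem.Str.strip part) with
  | [] => none
  | url :: rest =>
    let size := match rest with | [] => "0w" | s :: _ => s
    let width : Int :=
      if PySem.Str.endswith size "w" then
        (PySem.Int.ofStr? (PySem.Str.slice size none (some (-1)))).getD 0
      else 0
    some (width, url)

def choose_from_srcset_py (srcset : String) : Option String :=
  let candidates : List (Int × String) :=
    ((PySem.Str.split? srcset ",").getD []).foldl
      (fun acc part =>
        match pvParsePart part with
        | none => acc
        | some c => acc ++ [c]) []
  if candidates = [] then none
  else
    match PySem.List.sorted candidates (fun x => x.1) true with
    | [] => none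
    | c :: _ => some c.2

-- ===== PORT B =====
def choose_from_srcset_py_alt (srcset : String) : Option String :=
  let best : Option (Int × String) :=
    ((PySem.Str.split? srcset ",").getD []).foldl
      (fun best part =>
        match pvParsePart part with
        | none => best
        | some (w, url) =>
          match best with
          | none => some (w, url)
          | some b => if b.1 < w then some (w, url) else best) none
  best.map (fun b => b.2)

-- ===== PRECONDITION & SPEC =====
def Spec_choose_from_srcset_py (srcset : String) (out : Option String) : Prop := out = choose_from_srcset_py_alt srcset
instance (srcset : String) (out : Option String) : Decidable (Spec_choose_from_srcset_py srcset out) := by unfold Spec_choose_from_srcset_py; infer_instance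

-- ===== CLAIM (what is proved, stated in full; the proofs are below) =====
def Claim_equal_choose_from_srcset_py : Prop := ∀ (srcset : String), Dom_choose_from_srcset_py srcset → Spec_choose_from_srcset_py srcset (choose_from_srcset_py srcset)

-- ===== LEMMAS AND PROOFS =====

-- one step of B's running-best update, on an already-parsed candidate
def pvBestStep (b : Option (Int × String)) (c : Int × String) : Option (Int × String) :=
  match b with
  | none => some c
  | some bb => if bb.1 < c.1 then some c else b

theorem pv_foldlB_eq_filterMap (parts : List String) (b : Option (Int × String)) :
    parts.foldl
      (fun best part =>
        match pvParsePart part with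
        | none => best
        | some (w, url) =>
          match best with
          | none => some (w, url)
          | some bb => if bb.1 < w then some (w, url) else best) b
    = (parts.filterMap pvParsePart).foldl pvBestStep b := by
  induction parts generalizing b with
  | nil => rfl
  | cons p ps ih =>
    simp only [List.foldl_cons, List.filterMap_cons]
    cases h : pvParsePart p with
    | none => simp [ih]
    | some c =>
      cases c with
      | mk w u =>
        simp only [List.foldl_cons, ih]
        cases b <;> rfl

theorem pv_foldlA_eq_filterMap (parts : List String) (acc : List (Int × String)) :
    parts.foldl
      (fun acc part =>
        match pvParsePart part with
        | none => acc
        | some c => acc ++ [c]) acc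
    = acc ++ parts.filterMap pvParsePart := by
  induction parts generalizing acc with
  | nil => simp
  | cons p ps ih =>
    simp only [List.foldl_cons, List.filterMap_cons]
    cases h : pvParsePart p with
    | none => simp [ih]
    | some c => simp [ih]

theorem pv_insertBy_head (acc : List (Int × String)) (x : Int × String) :
    (PySem.List.insertBy (fun a b => decide (b.1 < a.1)) x acc).head?
    = pvBestStep acc.head? x := by
  cases acc with
  | nil => rfl
  | cons h t =>
    simp only [PySem.List.insertBy, pvBestStep]
    by_cases hlt : h.1 < x.1 <;> simp [hlt]

theorem pv_foldl_insertBy_head (cs : List (Int × String)) (acc : List (Int × String)) :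
    (cs.foldl (fun a x => PySem.List.insertBy (fun a b => decide (b.1 < a.1)) x a) acc).head?
    = cs.foldl pvBestStep acc.head? := by
  induction cs generalizing acc with
  | nil => rfl
  | cons c cs ih =>
    simp only [List.foldl_cons, ih, pv_insertBy_head]

theorem pv_sorted_rev_head (cs : List (Int × String)) :
    (PySem.List.sorted cs (fun x => x.1) true).head? = cs.foldl pvBestStep none := by
  rw [PySem.List.sorted_rev_eq_foldl_insertBy]
  exact pv_foldl_insertBy_head cs []

-- ===== VERDICT (by name: the statement is the Claim_ definition above) =====
theorem choose_from_srcset_py_spec : Claim_equal_choose_from_srcset_py := by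
  intro srcset _
  unfold Spec_choose_from_srcset_py choose_from_srcset_py choose_from_srcset_py_alt
  simp only [pv_foldlB_eq_filterMap, pv_foldlA_eq_filterMap, List.nil_append]
  set cs := ((PySem.Str.split? srcset ",").getD []).filterMap pvParsePart with hcs
  by_cases h : cs = []
  · simp [h]
  · rw [if_neg h]
    have hs : PySem.List.sorted cs (fun x => x.1) true ≠ [] := by
      simpa [PySem.List.sorted_eq_nil_iff] using h
    cases hsor : PySem.List.sorted cs (fun x => x.1) true with
    | nil => exact absurd hsor hs
    | cons c t =>
      have := pv_sorted_rev_head cs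
      rw [hsor] at this
      simp only [List.head?_cons] at this
      rw [← this]
      rfl
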